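-- pv_equiv track=rewrite | github.com/giottorin/some | splitter.py | read_next_token
-- ===== SOURCE A (Python) =====
-- def read_next_token(string, start):
--     start_to_end = {'0': ' ', '1' : ' ', '2' : ' ', '3' : ' ', '4' : ' ', '5' : ' ','6' : ' ','7' : ' ','8' : ' ','9' : ' ','\"': '\"', '[' : ']', '{' : '}', '-' : ' '}
--
--     end = start_to_end[string[start]]
--
--     i = start + 1
--     token = string[start]
--
--
--     while i < len(string) and string[i] != end:
--         token += string[i]
--         i += 1
--
--     if end == '"' or end == ']':
--         token += end
--
--     return token
-- ===== SOURCE B (Python) =====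
-- def read_next_token(string, start):
--     start_to_end = {'0': ' ', '1': ' ', '2': ' ', '3': ' ', '4': ' ', '5': ' ',
--                     '6': ' ', '7': ' ', '8': ' ', '9': ' ', '"': '"', '[': ']',
--                     '{': '}', '-': ' '}
--     end = start_to_end[string[start]]
--     j = string.find(end, start + 1)
--     token = string[start:] if j == -1 else string[start:j]
--     if end == '"' or end == ']':
--         token += end
--     return token
-- ===== Notes on version B (the rewrite author's own statement) =====
-- stated objective: idiomatic
-- what changed: Replaces the index-incrementing while-loop that accumulates the token character by character with a single str.find for the closing delimiter followed by one slice.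
-- outside the precondition, e.g. on read_next_token('a5', -1): A returns '5a5', B returns '5'
import Mathlib
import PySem

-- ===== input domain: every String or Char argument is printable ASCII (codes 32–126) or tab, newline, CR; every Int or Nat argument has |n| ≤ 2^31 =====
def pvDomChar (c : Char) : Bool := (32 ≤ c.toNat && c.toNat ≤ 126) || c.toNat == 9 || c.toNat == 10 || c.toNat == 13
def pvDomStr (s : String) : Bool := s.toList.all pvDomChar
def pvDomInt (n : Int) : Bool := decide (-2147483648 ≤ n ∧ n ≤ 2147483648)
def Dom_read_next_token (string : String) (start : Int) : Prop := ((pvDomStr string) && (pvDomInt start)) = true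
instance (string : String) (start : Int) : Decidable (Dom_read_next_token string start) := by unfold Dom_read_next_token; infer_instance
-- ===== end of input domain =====

-- B reads the token with one str.find + one slice instead of A's character-accumulating
-- while-loop (idiomatic rewrite; equal return values on non-negative in-range starts).

-- ===== PORT A =====
-- the Python dict literal start_to_end (identical in A and B; shared helper)
def startToEnd : PySem.Dict Char Char :=
  PySem.Dict.ofList [('0', ' '), ('1', ' '), ('2', ' '), ('3', ' '), ('4', ' '), ('5', ' '),
    ('6', ' '), ('7', ' '), ('8', ' '), ('9', ' '), ('"', '"'), ('[', ']'), ('{', '}'), ('-', ' ')]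

-- while i < len(string) and string[i] != end: token += string[i]; i += 1
-- (if string[i] raises — only reachable for i < -len, outside Pre_ — we stop with the current token)
def rntLoop (cs : List Char) (e : Char) (i : Int) (token : List Char) : List Char :=
  if _h : i < (cs.length : Int) then
    match PySem.List.pyGet? cs i with
    | none => token
    | some c => if c = e then token else rntLoop cs e (i + 1) (token ++ [c])
  else token
termination_by ((cs.length : Int) - i).toNat
decreasing_by omega

def read_next_token (string : String) (start : Int) : String :=
  match PySem.Str.pyGet? string start with
  | none => ""          -- Python: IndexError (outside Pre_)
  | some c =>
    match startToEnd.get? c with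
    | none => ""        -- Python: KeyError (outside Pre_)
    | some e =>
      let token := rntLoop string.toList e (start + 1) [c]
      String.ofList (if e = '"' ∨ e = ']' then token ++ [e] else token)

-- ===== PORT B =====
def read_next_token_alt (string : String) (start : Int) : String :=
  match PySem.Str.pyGet? string start with
  | none => ""          -- Python: IndexError (outside Pre_)
  | some c =>
    match startToEnd.get? c with
    | none => ""        -- Python: KeyError (outside Pre_)
    | some e =>
      let j := PySem.Str.findFrom string (String.ofList [e]) (start + 1) none
      let token := if j = -1 then PySem.List.slice string.toList (some start) none
                   else PySem.List.slice string.toList (some start) (some j)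
      String.ofList (if e = '"' ∨ e = ']' then token ++ [e] else token)

-- ===== PRECONDITION & SPEC =====
-- Pre_ excludes starts that are out of range or point at a character outside the delimiter
-- table (A raises IndexError/KeyError there), and negative in-range starts, where A's
-- incrementing-index loop accidentally wraps from the string's tail back to its front.
def Pre_read_next_token (string : String) (start : Int) : Prop :=
  0 ≤ start ∧ start < (string.toList.length : Int) ∧
    string.toList.getD start.toNat ' ' ∈
      ['0', '1', '2', '3', '4', '5', '6', '7', '8', '9', '"', '[', '{', '-']
instance (string : String) (start : Int) : Decidable (Pre_read_next_token string start) := by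
  unfold Pre_read_next_token; infer_instance

def pvWitness_read_next_token : String × Int := ("[ab] cd", 0)

def Spec_read_next_token (string : String) (start : Int) (out : String) : Prop := out = read_next_token_alt string start
instance (string : String) (start : Int) (out : String) : Decidable (Spec_read_next_token string start out) := by unfold Spec_read_next_token; infer_instance

-- ===== CLAIM (what is proved, stated in full; the proofs are below) =====
def Claim_equal_read_next_token : Prop := ∀ (string : String) (start : Int), Dom_read_next_token string start → Pre_read_next_token string start → Spec_read_next_token string start (read_next_token string start)

-- ===== LEMMAS AND PROOFS =====

-- A's while-loop collects exactly the longest e-free run of the remaining characters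
theorem rntLoop_eq_takeWhile (cs : List Char) (e : Char) :
    ∀ (n s : Nat) (token : List Char), cs.length - s = n →
      rntLoop cs e (s : Int) token = token ++ (cs.drop s).takeWhile (fun x => x != e) := by
  intro n
  induction n with
  | zero =>
    intro s token h
    have hs : cs.length ≤ s := by omega
    rw [rntLoop]
    simp [List.drop_eq_nil_of_le hs, by exact_mod_cast Nat.not_lt.mpr hs]
  | succ n ih =>
    intro s token h
    have hs : s < cs.length := by omega
    rw [rntLoop]
    rw [dif_pos (by exact_mod_cast hs)]
    rw [PySem.List.pyGet?_natCast, List.getElem?_eq_getElem hs,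
        List.drop_eq_getElem_cons hs, List.takeWhile_cons]
    by_cases hc : cs[s] = e
    · simp [hc]
    · have hcast : (s : Int) + 1 = ((s + 1 : Nat) : Int) := by push_cast; ring
      simp only [hc, hcast, bne_iff_ne, ne_eq, not_false_iff, if_pos]
      rw [ih (s + 1) (token ++ [cs[s]]) (by omega)]
      simp [List.append_assoc]

theorem takeWhile_ne_of_not_mem (e : Char) (l : List Char) (h : e ∉ l) :
    l.takeWhile (fun x => x != e) = l := by
  induction l with
  | nil => rfl
  | cons x t ih =>
    have hx : x ≠ e := by intro he; exact h (he ▸ List.mem_cons_self)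
    simp [hx, ih (fun ht => h (List.mem_cons_of_mem _ ht))]

theorem takeWhile_eq_take_of_first (e : Char) :
    ∀ (l : List Char) (j : Nat), l[j]? = some e → (∀ i, i < j → l[i]? ≠ some e) →
      l.takeWhile (fun x => x != e) = l.take j := by
  intro l
  induction l with
  | nil => intro j hj _; simp at hj
  | cons x t ih =>
    intro j hj hlt
    cases j with
    | zero =>
      simp only [List.getElem?_cons_zero, Option.some.injEq] at hj
      simp [hj]
    | succ k =>
      have hx : x ≠ e := by
        intro he
        exact hlt 0 (Nat.succ_pos k) (by simp [he])
      simp only [List.getElem?_cons_succ] at hj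
      have ht : ∀ i, i < k → t[i]? ≠ some e := by
        intro i hi
        have := hlt (i + 1) (by omega)
        simpa using this
      simp [hx, ih k hj ht]

-- singleton-prefix of a drop = character at that index
theorem singleton_prefix_drop_iff (e : Char) (l : List Char) (i : Nat) :
    [e] <+: l.drop i ↔ l[i]? = some e := by
  rw [← List.head?_drop]
  constructor
  · rintro ⟨t, ht⟩
    rw [← ht]; rfl
  · intro h
    cases hd : l.drop i with
    | nil => rw [hd] at h; simp at h
    | cons y ys =>
      rw [hd] at h
      simp only [List.head?_cons, Option.some.injEq] at h
      exact ⟨ys, by simp [h]⟩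

-- the token-body computed by the two ports agrees
theorem body_eq (cs : List Char) (e : Char) (s : Nat) (hs : s < cs.length) :
    rntLoop cs e ((s : Int) + 1) [cs[s]] =
      (if PySem.Chars.findFrom cs [e] ((s : Int) + 1) none = -1
       then PySem.List.slice cs (some (s : Int)) none
       else PySem.List.slice cs (some (s : Int))
              (some (PySem.Chars.findFrom cs [e] ((s : Int) + 1) none))) := by
  have hcast : (s : Int) + 1 = ((s + 1 : Nat) : Int) := by push_cast; ring
  have hk : s + 1 ≤ cs.length := by omega
  rw [hcast, PySem.Chars.findFrom_natCast cs [e] (s + 1) hk]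
  rw [rntLoop_eq_takeWhile cs e (cs.length - (s + 1)) (s + 1) [cs[s]] rfl]
  by_cases hf : PySem.Chars.find (cs.drop (s + 1)) [e] = -1
  · -- e does not occur after position s: token = string[start:]
    rw [if_pos hf]
    have hnm : e ∉ cs.drop (s + 1) := by
      intro hmem
      obtain ⟨u, v, huv⟩ := List.append_of_mem hmem
      exact ((PySem.Chars.find_eq_neg_one_iff _ _).mp hf) ⟨u, v, by rw [huv]; simp⟩
    rw [takeWhile_ne_of_not_mem e _ hnm, PySem.List.slice_from_natCast,
        ← List.getElem_cons_drop hs]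
    simp
  · -- e found at absolute index s+1+f
    rw [if_neg hf]
    have hnn : 0 ≤ PySem.Chars.find (cs.drop (s + 1)) [e] :=
      (PySem.Chars.find_nonneg_iff _ _).mpr ((PySem.Chars.find_ne_neg_one_iff _ _).mp hf)
    set f := PySem.Chars.find (cs.drop (s + 1)) [e] with hfdef
    have hne : ¬ ((s + 1 : Nat) : Int) + f = -1 := by omega
    rw [if_neg hne]
    obtain ⟨hpre, hmin⟩ := PySem.Chars.find_spec hnn
    rw [List.drop_drop] at hpre
    have hj : cs[s + 1 + f.toNat]? = some e := (singleton_prefix_drop_iff e cs _).mp hpre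
    have hlt : ∀ i, i < f.toNat → (cs.drop (s + 1))[i]? ≠ some e := by
      intro i hi hie
      exact hmin i hi ((singleton_prefix_drop_iff e (cs.drop (s + 1)) i).mpr hie)
    have htw : (cs.drop (s + 1)).takeWhile (fun x => x != e) = (cs.drop (s + 1)).take f.toNat := by
      apply takeWhile_eq_take_of_first e _ f.toNat _ hlt
      rw [List.getElem?_drop]
      exact hj
    have hcast2 : ((s + 1 : Nat) : Int) + f = (((s + 1 + f.toNat : Nat)) : Int) := by omega
    rw [htw, hcast2, PySem.List.slice_natCast]
    have : s + 1 + f.toNat - s = f.toNat + 1 := by omega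
    rw [this, ← List.getElem_cons_drop hs, List.take_succ_cons]
    rfl

theorem key_lookup_isSome (c : Char)
    (h : c ∈ ['0', '1', '2', '3', '4', '5', '6', '7', '8', '9', '"', '[', '{', '-']) :
    (startToEnd.get? c).isSome := by
  fin_cases h <;> decide

-- ===== VERDICT (by name: the statement is the Claim_ definition above) =====
theorem read_next_token_spec : Claim_equal_read_next_token := by
  intro string start _hdom hpre
  obtain ⟨h0, hlen, hkey⟩ := hpre
  obtain ⟨n, rfl⟩ : ∃ n : Nat, start = (n : Int) := ⟨start.toNat, (Int.toNat_of_nonneg h0).symm⟩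
  have hs : n < string.toList.length := by exact_mod_cast hlen
  simp only [Int.toNat_natCast] at hkey
  rw [List.getD_eq_getElem _ ' ' hs] at hkey
  have hget : PySem.Str.pyGet? string (n : Int) = some string.toList[n] := by
    rw [PySem.Str.pyGet?_natCast, List.getElem?_eq_getElem hs]
  obtain ⟨e, heq⟩ := Option.isSome_iff_exists.mp (key_lookup_isSome _ hkey)
  have hfind : PySem.Str.findFrom string (String.ofList [e]) ((n : Int) + 1) none =
      PySem.Chars.findFrom string.toList [e] ((n : Int) + 1) none := by
    rw [PySem.Str.findFrom_eq]
    simp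
  unfold Spec_read_next_token read_next_token read_next_token_alt
  simp only [hget, heq]
  rw [hfind, body_eq string.toList e n hs]
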